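-- pv_equiv track=rewrite | github.com/nitvishn/ProjectEuler | addmath.py | number_rotations
-- ===== SOURCE A (Python) =====
-- def number_rotations(number):
--     rotations = []
--     number = str(number)
--     current = number[1:] + number[0]
--     rotations.append(current)
--     while (current != number):
--         current = current[1:] + current[0]
--         rotations.append(current)
--     return rotations
-- ===== SOURCE B (Python) =====
-- def number_rotations(number):
--     s = str(number)
--     rots = [s[i:] + s[:i] for i in range(1, len(s) + 1)]
--     return rots[:rots.index(s) + 1]
-- ===== Notes on version B (the rewrite author's own statement) =====
-- stated objective: simpler
-- what changed: Replaces the incremental rotate-one-character-and-append while loop with building all len(s) slice rotations in one comprehension and truncating at the first occurrence of s (the rotation period found via list.index).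
import Mathlib
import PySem

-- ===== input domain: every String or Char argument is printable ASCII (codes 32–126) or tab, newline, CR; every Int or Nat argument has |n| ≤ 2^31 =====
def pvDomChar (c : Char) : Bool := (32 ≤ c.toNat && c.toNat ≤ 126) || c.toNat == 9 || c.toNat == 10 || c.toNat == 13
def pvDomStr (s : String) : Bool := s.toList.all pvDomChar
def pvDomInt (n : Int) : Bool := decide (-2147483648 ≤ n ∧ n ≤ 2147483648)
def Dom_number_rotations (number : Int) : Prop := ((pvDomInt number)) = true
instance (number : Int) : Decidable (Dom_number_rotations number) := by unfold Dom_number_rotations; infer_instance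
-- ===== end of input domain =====

-- B builds all slice rotations of str(number) in one comprehension and truncates at the first
-- occurrence of str(number) (found via list.index) instead of A's rotate-and-append while loop;
-- objective: simpler. Return values proved equal for every Int.

-- ===== PORT A =====
-- current[1:] + current[0]  (str(number) is never empty, so current[0] never raises)
def pvRot (cs : List Char) : List Char :=
  PySem.List.slice cs (some 1) none ++ (PySem.List.pyGet? cs 0).toList

-- the while loop; the fuel (length of str(number)) only makes it total: rotating length times is
-- the identity, so the loop stops strictly before the fuel runs out (proved in pvLoop_spec below)
def pvLoopA (number : List Char) : List Char → List String → Nat → List String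
  | _, acc, 0 => acc
  | cur, acc, fuel+1 =>
    if cur = number then acc
    else
      let next := pvRot cur
      pvLoopA number next (acc ++ [String.ofList next]) fuel

def number_rotations (number : Int) : List String :=
  let s := PySem.Int.toChars number
  let cur := pvRot s
  pvLoopA s cur [String.ofList cur] s.length

-- ===== PORT B =====
def number_rotations_alt (number : Int) : List String :=
  let s := PySem.Int.toChars number
  let rots := (PySem.List.pyRange 1 ((s.length : Int) + 1)).map
      (fun i => String.ofList (PySem.List.slice s (some i) none ++ PySem.List.slice s none (some i)))
  match PySem.List.index? rots (String.ofList s) with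
  | some k => PySem.List.slice rots none (some ((k : Int) + 1))
  | none => []  -- unreachable: the rotation by len(s) is s itself, so .index never raises

-- ===== PRECONDITION & SPEC =====
def Spec_number_rotations (number : Int) (out : List String) : Prop := out = number_rotations_alt number
instance (number : Int) (out : List String) : Decidable (Spec_number_rotations number out) := by unfold Spec_number_rotations; infer_instance

-- ===== CLAIM (what is proved, stated in full; the proofs are below) =====
def Claim_equal_number_rotations : Prop := ∀ (number : Int), Dom_number_rotations number → Spec_number_rotations number (number_rotations number)

-- ===== LEMMAS AND PROOFS =====

theorem pvToDigitsCore_ne_nil (b f n : Nat) (l : List Char) :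
    Nat.toDigitsCore b (f+1) n l ≠ [] := by
  induction f generalizing n l with
  | zero => rw [Nat.toDigitsCore]; split <;> simp [Nat.toDigitsCore]
  | succ f ih =>
    rw [Nat.toDigitsCore]
    split
    · simp
    · exact ih _ _

theorem pvToChars_ne_nil (n : Int) : PySem.Int.toChars n ≠ [] := by
  unfold PySem.Int.toChars
  split
  · simp
  · exact pvToDigitsCore_ne_nil 10 _ _ []

theorem pvRot_eq_rotate (cs : List Char) : pvRot cs = cs.rotate 1 := by
  rcases cs with _ | ⟨a, t⟩
  · simp [pvRot, PySem.List.slice_from_one, PySem.List.pyGet?]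
  · simp [pvRot, PySem.List.slice_from_one, List.rotate_cons_succ, PySem.List.pyGet?,
      PySem.List.pyIdx?]

theorem pvLoop_spec (s : List Char) (p : Nat) (hp1 : 1 ≤ p)
    (hpp : s.rotate p = s) (hmin : ∀ j, 1 ≤ j → j < p → s.rotate j ≠ s) :
    ∀ (fuel j : Nat) (acc : List String), 1 ≤ j → j ≤ p → p - j ≤ fuel →
    pvLoopA s (s.rotate j) acc fuel
      = acc ++ (List.range' (j+1) (p - j)).map (fun i => String.ofList (s.rotate i)) := by
  intro fuel
  induction fuel with
  | zero =>
    intro j acc hj1 hjp hfu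
    have hj : j = p := by omega
    subst hj
    simp [pvLoopA]
  | succ fuel ih =>
    intro j acc hj1 hjp hfu
    rw [pvLoopA]
    by_cases h : s.rotate j = s
    · have hj : j = p := by
        by_contra hne
        exact hmin j hj1 (by omega) h
      subst hj
      simp [h]
    · have hjp' : j < p := by
        by_contra hge
        have hj : j = p := by omega
        rw [hj] at h
        exact h hpp
      rw [if_neg h, pvRot_eq_rotate, List.rotate_rotate]
      rw [ih (j+1) _ (by omega) (by omega) (by omega)]
      have hr : List.range' (j+1) (p - j) = (j+1) :: List.range' (j+2) (p - (j+1)) := by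
        have hpj : p - j = (p - (j+1)) + 1 := by omega
        rw [hpj, List.range'_succ]
      rw [hr]
      simp

theorem pvOfList_ne {s t : List Char} (h : s ≠ t) :
    String.ofList s ≠ String.ofList t := by
  simpa [String.ofList_inj] using h

theorem pvKey (s : List Char) (hs : s ≠ []) :
    pvLoopA s (pvRot s) [String.ofList (pvRot s)] s.length
    = (match PySem.List.index? ((PySem.List.pyRange 1 ((s.length : Int) + 1)).map
          (fun i => String.ofList (PySem.List.slice s (some i) none ++ PySem.List.slice s none (some i))))
          (String.ofList s) with
       | some k => PySem.List.slice ((PySem.List.pyRange 1 ((s.length : Int) + 1)).map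
          (fun i => String.ofList (PySem.List.slice s (some i) none ++ PySem.List.slice s none (some i))))
          none (some ((k : Int) + 1))
       | none => []) := by
  set n := s.length with hn
  have hn1 : 1 ≤ n := by
    rcases s with _ | _
    · exact absurd rfl hs
    · simp [hn]
  have hrotn : s.rotate n = s := by rw [hn, List.rotate_length]
  have hex : ∃ k, s.rotate (k+1) = s := ⟨n - 1, by
    have h1 : (n - 1) + 1 = n := by omega
    rw [h1, hrotn]⟩
  set p := Nat.find hex + 1 with hpdef
  have hpp : s.rotate p = s := Nat.find_spec hex
  have hp1 : 1 ≤ p := by omega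
  have hmin : ∀ j, 1 ≤ j → j < p → s.rotate j ≠ s := by
    intro j hj1 hjp
    have hm := Nat.find_min hex (m := j - 1) (by omega)
    have hj : (j - 1) + 1 = j := by omega
    rwa [hj] at hm
  have hpn : p ≤ n := by
    have hle : Nat.find hex ≤ n - 1 := Nat.find_le (by
      have h1 : (n - 1) + 1 = n := by omega
      rw [h1, hrotn])
    omega
  set f : Nat → String := fun i => String.ofList (s.rotate i) with hf
  -- A's side: the loop produces the rotations 1 .. p
  have hA : pvLoopA s (pvRot s) [String.ofList (pvRot s)] n = (List.range' 1 p).map f := by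
    rw [pvRot_eq_rotate]
    rw [pvLoop_spec s p hp1 hpp hmin n 1 [String.ofList (s.rotate 1)] (le_refl 1) hp1 (by omega)]
    have hr : List.range' 1 p = 1 :: List.range' 2 (p - 1) := by
      have h1 : p = (p - 1) + 1 := by omega
      conv_lhs => rw [h1]
      exact List.range'_succ
    rw [hr]
    simp [hf]
  rw [hA]
  -- B's side: the slice rotations are the same rotations 1 .. n
  have hslice : ∀ i : Nat, i ≤ n → s.drop i ++ s.take i = s.rotate i := by
    intro i hi
    exact (List.rotate_eq_drop_append_take (by omega)).symm
  have hrots : (PySem.List.pyRange 1 ((n : Int) + 1)).map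
      (fun i => String.ofList (PySem.List.slice s (some i) none ++ PySem.List.slice s none (some i)))
      = (List.range' 1 n).map f := by
    rw [PySem.List.pyRange_one]
    have hcast : ((n : Int) + 1 - 1).toNat = n := by omega
    rw [hcast, List.range'_eq_map_range, List.map_map, List.map_map]
    apply List.map_congr_left
    intro k hk
    have hk' : k < n := List.mem_range.mp hk
    have h1 : (1 : Int) + (k : Int) = ((k + 1 : Nat) : Int) := by push_cast; ring
    simp only [Function.comp_apply, h1, PySem.List.slice_from_natCast, PySem.List.slice_to_natCast]
    have h2 : (1 : ℕ) + k = k + 1 := by omega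
    rw [h2, hf, hslice (k+1) (by omega)]
  rw [hrots]
  -- splitting the range at p
  have hsplit : List.range' 1 n = List.range' 1 (p - 1) ++ (p :: List.range' (p + 1) (n - p)) := by
    have h1 : List.range' 1 (p - 1) ++ List.range' (1 + 1 * (p - 1)) ((n - p) + 1) 1
        = List.range' 1 ((p - 1) + ((n - p) + 1)) := List.range'_append
    have h2 : 1 + 1 * (p - 1) = p := by omega
    have h3 : (p - 1) + ((n - p) + 1) = n := by omega
    rw [h2, h3] at h1
    rw [← h1, List.range'_succ]
  -- index finds str(number) at position p - 1
  have hidx : PySem.List.index? ((List.range' 1 n).map f) (String.ofList s) = some (p - 1) := by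
    rw [PySem.List.index?_eq_some_iff]
    refine ⟨(List.range' 1 (p - 1)).map f, (List.range' (p + 1) (n - p)).map f, ?_, ?_, ?_⟩
    · rw [hsplit]
      simp [hf, hpp]
    · simp
    · intro hmem
      rw [List.mem_map] at hmem
      obtain ⟨i, hi, hie⟩ := hmem
      rw [List.mem_range'_1] at hi
      have hie' : String.ofList (s.rotate i) = String.ofList s := by
        rw [← hie, hf]
      exact pvOfList_ne (hmin i hi.1 (by omega)) hie'
  rw [hidx]
  show List.map f (List.range' 1 p)
      = PySem.List.slice ((List.range' 1 n).map f) none (some (((p - 1 : Nat) : Int) + 1))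
  have hc : ((p - 1 : Nat) : Int) + 1 = ((p : Nat) : Int) := by omega
  rw [hc, PySem.List.slice_to_natCast, hsplit]
  have hmapsplit : (List.range' 1 (p - 1) ++ (p :: List.range' (p + 1) (n - p))).map f
      = ((List.range' 1 (p - 1)).map f ++ [f p]) ++ (List.range' (p + 1) (n - p)).map f := by
    simp
  have hlen : ((List.range' 1 (p - 1)).map f ++ [f p]).length = p := by
    simp
    omega
  rw [hmapsplit, List.take_left' hlen]
  have hrp : List.range' 1 p = List.range' 1 (p - 1) ++ [p] := by
    have h1 : List.range' 1 (p - 1) ++ List.range' (1 + 1 * (p - 1)) 1 1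
        = List.range' 1 ((p - 1) + 1) := List.range'_append
    have h2 : 1 + 1 * (p - 1) = p := by omega
    have h3 : (p - 1) + 1 = p := by omega
    rw [h2, h3] at h1
    rw [← h1]
    simp
  rw [hrp]
  simp

-- ===== VERDICT (by name: the statement is the Claim_ definition above) =====
theorem number_rotations_spec : Claim_equal_number_rotations := by
  intro number _
  exact pvKey (PySem.Int.toChars number) (pvToChars_ne_nil number)
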